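-- pv_equiv track=rewrite | github.com/domebuehler/WikipediaGameTesting | wikipedia_game_test.py | get_brackets_depth_until
-- ===== SOURCE A (Python) =====
-- def get_brackets_depth_until(text: str, end_index: int) -> int:
--     if len(text) < end_index:
--         return -1
--
--     depth = 0
--     for char in text[:end_index]:
--         match char:
--             case '(' | '[':
--                 depth += 1
--             case ')' | ']':
--                 depth -= 1
--             case _:
--                 pass
--
--     return depth
-- ===== SOURCE B (Python) =====
-- def get_brackets_depth_until(text: str, end_index: int) -> int:
--     if len(text) < end_index:
--         return -1
--     prefix = text[:end_index]
--     return prefix.count('(') + prefix.count('[') - prefix.count(')') - prefix.count(']')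
-- ===== Notes on version B (the rewrite author's own statement) =====
-- stated objective: idiomatic
-- what changed: Replaced the single-pass match/accumulator loop with the closed formula prefix.count('(') + prefix.count('[') - prefix.count(')') - prefix.count(']') over the same slice.
import Mathlib
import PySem

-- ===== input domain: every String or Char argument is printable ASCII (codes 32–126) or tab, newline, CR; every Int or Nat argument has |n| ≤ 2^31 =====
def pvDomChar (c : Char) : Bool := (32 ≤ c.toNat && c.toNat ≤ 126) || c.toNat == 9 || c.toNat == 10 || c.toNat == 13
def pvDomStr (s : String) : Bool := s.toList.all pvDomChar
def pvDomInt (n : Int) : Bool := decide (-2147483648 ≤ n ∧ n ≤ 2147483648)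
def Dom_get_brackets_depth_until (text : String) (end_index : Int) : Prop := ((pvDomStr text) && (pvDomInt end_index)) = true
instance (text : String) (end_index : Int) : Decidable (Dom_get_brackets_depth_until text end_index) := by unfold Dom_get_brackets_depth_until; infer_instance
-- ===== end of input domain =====

-- B replaces A's one-pass running-depth loop by four independent str.count scans combined in a closed formula (objective: idiomatic; measurably faster at large n: C-level str.count scans replace a Python-level per-char loop).

-- ===== PORT A =====
def get_brackets_depth_until (text : String) (end_index : Int) : Int :=
  if (PySem.Str.len text : Int) < end_index then -1
  else
    (PySem.Str.slice text none (some end_index)).toList.foldl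
      (fun depth c =>
        if c = '(' ∨ c = '[' then depth + 1
        else if c = ')' ∨ c = ']' then depth - 1
        else depth) 0

-- ===== PORT B =====
def get_brackets_depth_until_alt (text : String) (end_index : Int) : Int :=
  if (PySem.Str.len text : Int) < end_index then -1
  else
    let pfx := PySem.Str.slice text none (some end_index)
    (PySem.Str.count pfx "(" : Int) + (PySem.Str.count pfx "[" : Int)
      - (PySem.Str.count pfx ")" : Int) - (PySem.Str.count pfx "]" : Int)

-- ===== PRECONDITION & SPEC =====
def Spec_get_brackets_depth_until (text : String) (end_index : Int) (out : Int) : Prop := out = get_brackets_depth_until_alt text end_index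
instance (text : String) (end_index : Int) (out : Int) : Decidable (Spec_get_brackets_depth_until text end_index out) := by unfold Spec_get_brackets_depth_until; infer_instance

-- ===== CLAIM (what is proved, stated in full; the proofs are below) =====
def Claim_equal_get_brackets_depth_until : Prop := ∀ (text : String) (end_index : Int), Dom_get_brackets_depth_until text end_index → Spec_get_brackets_depth_until text end_index (get_brackets_depth_until text end_index)

-- ===== LEMMAS AND PROOFS =====

-- single-character Python str.count is plain character count
theorem chars_count_go_single (c : Char) : ∀ (fuel : Nat) (cs : List Char) (acc : Nat), cs.length ≤ fuel →
    PySem.Chars.count.go [c] fuel cs acc = acc + cs.count c := by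
  intro fuel
  induction fuel with
  | zero => intro cs acc h; simp at h; simp [h, PySem.Chars.count.go]
  | succ n ih =>
    intro cs acc h
    cases cs with
    | nil => simp [PySem.Chars.count.go]
    | cons x t =>
      simp only [PySem.Chars.count.go, List.isPrefixOf]
      by_cases hc : c = x
      · subst hc
        simp only [BEq.rfl, if_true, Bool.and_true]
        rw [ih]
        · simp; omega
        · simp at h ⊢; omega
      · have : (c == x) = false := by simp [hc]
        simp only [this, Bool.false_and]
        rw [ih t acc (by simp at h ⊢; omega)]
        simp [eq_comm, hc]

theorem chars_count_single (cs : List Char) (c : Char) : PySem.Chars.count cs [c] = cs.count c := by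
  simp [PySem.Chars.count, chars_count_go_single c cs.length cs 0 le_rfl]

-- A's running-depth fold equals the four-counts closed form
theorem foldl_depth (cs : List Char) (a : Int) :
    cs.foldl
      (fun depth c =>
        if c = '(' ∨ c = '[' then depth + 1
        else if c = ')' ∨ c = ']' then depth - 1
        else depth) a
      = a + cs.count '(' + cs.count '[' - cs.count ')' - cs.count ']' := by
  induction cs generalizing a with
  | nil => simp
  | cons x t ih =>
    simp only [List.foldl_cons, ih, List.count_cons]
    by_cases h1 : x = '('
    · simp [h1]; ring
    by_cases h2 : x = '['
    · simp [h2]; ring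
    by_cases h3 : x = ')'
    · simp [h3]; ring
    by_cases h4 : x = ']'
    · simp [h4, h3]; ring
    · simp [h1, h2, h3, h4]

-- ===== VERDICT (by name: the statement is the Claim_ definition above) =====
theorem get_brackets_depth_until_spec : Claim_equal_get_brackets_depth_until := by
  intro text end_index _
  unfold Spec_get_brackets_depth_until get_brackets_depth_until get_brackets_depth_until_alt
  split_ifs with h
  · rfl
  · simp only [PySem.Str.count_eq, foldl_depth]
    rw [show ("(" : String).toList = ['('] from rfl, show ("[" : String).toList = ['['] from rfl,
        show (")" : String).toList = [')'] from rfl, show ("]" : String).toList = [']'] from rfl]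
    simp only [chars_count_single]
    ring
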